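-- pv_equiv track=rewrite | github.com/2hongbi/baekjoon | 프로그래머스/unrated/135808. 과일 장수/과일 장수.py | solution
-- ===== SOURCE A (Python) =====
-- def solution(k, m, score):
--     if len(score) < m:
--         return 0
--     price = 0
--     score.sort(reverse=True)
--     for i in range(0, len(score), m):
--         if len(score[i:i+m]) < m:
--             break
--         price += min(score[i:i+m]) * m
--     return price
-- ===== SOURCE B (Python) =====
-- def solution(k, m, score):
--     s = sorted(score)
--     n = len(s)
--     return m * sum(x for i, x in enumerate(s) if (n - i) % m == 0)
-- ===== Notes on version B (the rewrite author's own statement) =====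
-- stated objective: simpler
-- what changed: B drops A's grouping machinery entirely: no descending sort, no stride loop over group slices, no min() scans and no break - it sorts ascending once and in a single comprehension selects exactly those elements whose distance from the end is a multiple of m (the group minima), summing them and multiplying by m once.
-- outside the precondition, e.g. on solution(1, -3, [1, 2, 3, 4, 5]): A returns 0, B returns -9
import Mathlib
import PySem

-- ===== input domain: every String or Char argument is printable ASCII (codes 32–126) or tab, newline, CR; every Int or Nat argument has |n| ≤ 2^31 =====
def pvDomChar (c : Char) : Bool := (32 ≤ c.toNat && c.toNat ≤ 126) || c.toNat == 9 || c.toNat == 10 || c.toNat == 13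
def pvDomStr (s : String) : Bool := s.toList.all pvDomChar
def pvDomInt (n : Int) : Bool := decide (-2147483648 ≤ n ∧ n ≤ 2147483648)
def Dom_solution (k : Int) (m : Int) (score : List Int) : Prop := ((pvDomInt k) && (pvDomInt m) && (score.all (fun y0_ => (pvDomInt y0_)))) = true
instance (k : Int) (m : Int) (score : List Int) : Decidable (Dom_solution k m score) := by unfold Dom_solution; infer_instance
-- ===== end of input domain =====

-- B drops A's grouping machinery (descending in-place sort, stride loop over m-slices with min()
-- and break): it sorts ascending and, in one pass, sums exactly the elements whose distance from
-- the end is a multiple of m, times m — objective: simpler. A sorts `score` in place, B does not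
-- mutate its argument: the equivalence proved here is about the RETURN value only.

-- ===== PORT A =====
-- the loop 'for i in range(0, len(score), m): if len(score[i:i+m]) < m: break; price += min(...)*m'
-- (`min` is only evaluated when the slice has length m ≥ 1, hence nonempty, so `.getD 0` is never hit)
def solutionLoop (s : List Int) (m : Int) : List Int → Int → Int
  | [], price => price
  | i :: rest, price =>
    let seg := PySem.List.slice s (some i) (some (i + m))
    if (seg.length : Int) < m then price
    else solutionLoop s m rest (price + ((PySem.List.min? seg (fun x => x)).getD 0) * m)

def solution (_k : Int) (m : Int) (score : List Int) : Int :=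
  if (score.length : Int) < m then 0
  else
    let s := PySem.List.sorted score (fun x => x) true
    solutionLoop s m (PySem.List.pyRange 0 (s.length : Int) m) 0

-- ===== PORT B =====
-- 's = sorted(score); n = len(s); return m * sum(x for i, x in enumerate(s) if (n - i) % m == 0)'
def solution_alt (_k : Int) (m : Int) (score : List Int) : Int :=
  let s := PySem.List.sorted score (fun x => x) false
  let n : Int := (s.length : Int)
  m * (((PySem.List.enumerate s 0).filter
          (fun p => PySem.Int.mod (n - p.1) m == 0)).map (fun p => p.2)).sum

-- ===== PRECONDITION & SPEC =====
-- Pre_ restricts to positive group size m, the task's natural domain (m is how many apples go in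
-- a box): at m = 0 A raises ValueError (zero range step) and B raises ZeroDivisionError; for
-- m < 0 no behaviour is specified and the two programs may disagree, so m ≤ 0 is excluded.
def Pre_solution (_k : Int) (m : Int) (_score : List Int) : Prop := 1 ≤ m
instance (k : Int) (m : Int) (score : List Int) : Decidable (Pre_solution k m score) := by unfold Pre_solution; infer_instance
def pvWitness_solution : Int × Int × List Int := (4, 3, [1, 2, 3, 1, 2])

def Spec_solution (k : Int) (m : Int) (score : List Int) (out : Int) : Prop := out = solution_alt k m score
instance (k : Int) (m : Int) (score : List Int) (out : Int) : Decidable (Spec_solution k m score out) := by unfold Spec_solution; infer_instance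

-- ===== CLAIM (what is proved, stated in full; the proofs are below) =====
def Claim_equal_solution : Prop := ∀ (k : Int) (m : Int) (score : List Int), Dom_solution k m score → Pre_solution k m score → Spec_solution k m score (solution k m score)

-- ===== LEMMAS AND PROOFS =====

-- sum of the last elements of the successive full m-blocks of a descending list s
def lsum (m : Nat) (s : List Int) : Int :=
  if _h : 0 < m ∧ m ≤ s.length then
    PySem.List.pyGetD s ((m : Int) - 1) 0 + lsum m (s.drop m)
  else 0
termination_by s.length
decreasing_by simp [List.length_drop]; omega

theorem lsum_of_le {m : Nat} {s : List Int} (hm : 0 < m) (h : m ≤ s.length) :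
    lsum m s = PySem.List.pyGetD s ((m : Int) - 1) 0 + lsum m (s.drop m) := by
  rw [lsum, dif_pos ⟨hm, h⟩]

theorem lsum_of_lt {m : Nat} {s : List Int} (h : s.length < m) : lsum m s = 0 := by
  rw [lsum, dif_neg (by omega)]

-- the last element of a descending-pairwise nonempty list is a minimum
theorem getLast_le_of_pairwise {l : List Int} (hp : l.Pairwise (fun a b => b ≤ a)) (h : l ≠ []) :
    ∀ y ∈ l, l.getLast h ≤ y := by
  induction l with
  | nil => simp at h
  | cons x t ih =>
    intro y hy
    rcases List.pairwise_cons.mp hp with ⟨hx, ht⟩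
    cases t with
    | nil =>
      have : y = x := by simpa using hy
      simp [this]
    | cons z u =>
      rw [List.getLast_cons (by simp)]
      rcases List.mem_cons.mp hy with hy | hy
      · subst hy; exact le_trans (ih ht (by simp) z (by simp)) (hx z (by simp))
      · exact ih ht (by simp) y hy

-- min(first m elements) of a descending-pairwise list is its (m-1)-st element
theorem min_take_eq {s : List Int} {m : Nat} (hp : s.Pairwise (fun a b => b ≤ a))
    (hm : 0 < m) (hlen : m ≤ s.length) :
    ((PySem.List.min? (s.take m) (fun x => x)).getD 0) = PySem.List.pyGetD s ((m : Int) - 1) 0 := by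
  have hne : s.take m ≠ [] := by
    rw [Ne, List.take_eq_nil_iff]
    rintro (h | h)
    · omega
    · subst h; simp at hlen; omega
  obtain ⟨v, hv⟩ : ∃ v, PySem.List.min? (s.take m) (fun x => x) = some v := by
    cases hmin : PySem.List.min? (s.take m) (fun x => x) with
    | none => exact absurd ((PySem.List.min?_eq_none_iff _ _).mp hmin) hne
    | some v => exact ⟨v, rfl⟩
  have htl : (s.take m).length = m := by simp; omega
  have hlast : (s.take m).getLast hne = s[m - 1]'(by omega) := by
    rw [List.getLast_eq_getElem]
    have h1 : (s.take m)[(s.take m).length - 1]'(by simp; omega)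
        = s[(s.take m).length - 1]'(by simp; omega) := List.getElem_take
    rw [h1]
    congr 1
    omega
  have hptake : (s.take m).Pairwise (fun a b => b ≤ a) :=
    List.Pairwise.sublist (List.take_sublist m s) hp
  have h1 : v ≤ (s.take m).getLast hne := PySem.List.min?_isMin hv _ (List.getLast_mem hne)
  have h2 : (s.take m).getLast hne ≤ v :=
    getLast_le_of_pairwise hptake hne v (PySem.List.min?_mem hv)
  have hcast : ((m : Int) - 1) = ((m - 1 : Nat) : Int) := by omega
  rw [hv, hcast, PySem.List.pyGetD_natCast]
  have hg : s.getD (m - 1) 0 = s[m - 1]'(by omega) := List.getD_eq_getElem s 0 (by omega)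
  rw [Option.getD_some, hg, ← hlast]
  exact le_antisymm h1 h2

-- the count of range(i, n, m) (0 < m) as a Nat, and its map form
theorem pyRange_pos_nat (i n m : Nat) (hm : 0 < m) :
    PySem.List.pyRange (i : Int) (n : Int) (m : Int) =
      (List.range (if i < n then (n - i + m - 1) / m else 0)).map
        (fun (k : Nat) => (i : Int) + (m : Int) * (k : Int)) := by
  rw [PySem.List.pyRange_of_pos _ _ (by exact_mod_cast hm : (0 : Int) < (m : Int))]
  have hcount : (if (i : Int) < (n : Int) then (((n : Int) - i + m - 1) / m).toNat else 0)
      = (if i < n then (n - i + m - 1) / m else 0) := by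
    by_cases h : i < n
    · rw [if_pos (by exact_mod_cast h), if_pos h]
      have h1 : ((n : Int) - i + m - 1) = ((n - i + m - 1 : Nat) : Int) := by omega
      rw [h1, ← Int.natCast_div, Int.toNat_natCast]
    · rw [if_neg (by exact_mod_cast h), if_neg h]
  rw [hcount]

-- ===== A-side: the loop over range(0, n, m) computes m * lsum =====
theorem solutionLoop_eq_lsum (s : List Int) (m : Nat) (hm : 0 < m)
    (hp : s.Pairwise (fun a b => b ≤ a)) :
    ∀ (c i : Nat) (price : Int),
      c = (if i < s.length then (s.length - i + m - 1) / m else 0) →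
      solutionLoop s (m : Int) ((List.range c).map (fun (k : Nat) => (i : Int) + (m : Int) * (k : Int))) price
        = price + (m : Int) * lsum m (s.drop i) := by
  intro c
  induction c with
  | zero =>
    intro i price hc
    have hin : s.length ≤ i := by
      by_contra h
      rw [if_pos (by omega)] at hc
      have h1 : 1 ≤ (s.length - i + m - 1) / m := (Nat.one_le_div_iff hm).mpr (by omega)
      rw [← hc] at h1
      exact absurd h1 (by omega)
    have hdrop : (s.drop i).length < m := by simp [List.length_drop]; omega
    simp [solutionLoop, lsum_of_lt hdrop]
  | succ c ih =>
    intro i price hc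
    have hin : i < s.length := by
      by_contra h
      rw [if_neg h] at hc
      omega
    rw [List.range_succ_eq_map, List.map_cons, List.map_map]
    have h0 : ((i : Int) + (m : Int) * ((0 : Nat) : Int)) = ((i : Nat) : Int) := by push_cast; ring
    rw [h0]
    have hseg : PySem.List.slice s (some ((i : Nat) : Int)) (some (((i : Nat) : Int) + (m : Int))) = (s.drop i).take m := by
      exact_mod_cast PySem.List.slice_natCast_add s i m
    simp only [solutionLoop, hseg]
    have hlen : ((s.drop i).take m).length = min m (s.length - i) := by
      simp [List.length_take, List.length_drop]
    by_cases hsm : s.length - i < m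
    · -- partial block: A breaks, and lsum of the short tail is 0
      have hbrk : ((((s.drop i).take m).length : Int) < (m : Int)) := by
        rw [hlen]; exact_mod_cast (by omega : min m (s.length - i) < m)
      rw [if_pos hbrk]
      have : (s.drop i).length < m := by simp [List.length_drop]; omega
      rw [lsum_of_lt this]; ring
    · -- full block
      have hnotlt : ¬ ((((s.drop i).take m).length : Int) < (m : Int)) := by
        rw [hlen]
        have : min m (s.length - i) = m := by omega
        rw [this]; omega
      rw [if_neg hnotlt]
      have hpd : (s.drop i).Pairwise (fun a b => b ≤ a) :=
        List.Pairwise.sublist (List.drop_sublist i s) hp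
      have hmin := min_take_eq hpd hm (by simp [List.length_drop]; omega)
      have hmap : (List.range c).map ((fun (k : Nat) => (i : Int) + (m : Int) * (k : Int)) ∘ Nat.succ)
          = (List.range c).map (fun (k : Nat) => ((i + m : Nat) : Int) + (m : Int) * (k : Int)) := by
        apply List.map_congr_left; intro a _
        simp only [Function.comp_apply, Nat.succ_eq_add_one]
        push_cast; ring
      have hcnext : c = (if i + m < s.length then (s.length - (i + m) + m - 1) / m else 0) := by
        rw [if_pos (by omega)] at hc
        by_cases h2 : i + m < s.length
        · rw [if_pos h2]
          have e1 : s.length - i + m - 1 = (s.length - (i + m) + m - 1) + m := by omega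
          rw [e1, Nat.add_div_right _ hm] at hc
          exact Nat.succ_inj.mp hc
        · rw [if_neg h2]
          have e2 : (s.length - i + m - 1) / m = 1 :=
            Nat.div_eq_of_lt_le (by omega) (by omega)
          rw [e2] at hc
          omega
      rw [hmap, ih (i + m) _ hcnext]
      rw [lsum_of_le (m := m) (s := s.drop i) hm (by simp [List.length_drop]; omega), hmin]
      rw [show (s.drop i).drop m = s.drop (i + m) by rw [List.drop_drop, Nat.add_comm]]
      ring

-- ===== B-side: the filtered enumerate sum over the ascending list computes lsum of its reverse =====
theorem not_dvd_of_bounds {m x : Int} (hm : 0 < m) (h1 : 0 < x) (h2 : x < m) : ¬ m ∣ x := by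
  rintro ⟨c, rfl⟩
  rcases lt_trichotomy c 0 with h | h | h
  · nlinarith
  · simp [h] at h1
  · nlinarith

theorem bfilter_sum (m : Nat) (hm : 0 < m) :
    ∀ (n : Nat) (a : List Int), a.length ≤ n →
      (((PySem.List.enumerate a 0).filter
          (fun p => PySem.Int.mod ((a.length : Int) - p.1) (m : Int) == 0)).map (fun p => p.2)).sum
        = lsum m a.reverse := by
  intro n
  induction n with
  | zero =>
    intro a ha
    have : a = [] := List.length_eq_zero_iff.mp (by omega)
    subst this
    rw [lsum_of_lt (by simpa using hm)]
    simp [PySem.List.enumerate]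
  | succ n ih =>
    intro a ha
    by_cases hlt : a.length < m
    · -- short list: no index passes the divisibility test
      have hfe : (PySem.List.enumerate a 0).filter
          (fun p => PySem.Int.mod ((a.length : Int) - p.1) (m : Int) == 0) = [] := by
        apply List.filter_eq_nil_iff.mpr
        intro p hp
        rcases (PySem.List.mem_enumerate_iff _ _ _).mp hp with ⟨j, hj, rfl⟩
        simp only [beq_iff_eq, PySem.Int.mod_eq_zero_iff_dvd]
        exact not_dvd_of_bounds (by exact_mod_cast hm) (by omega) (by omega)
      rw [hfe, lsum_of_lt (by simpa using hlt)]
      simp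
    · -- m ≤ length: peel the last m elements
      have hml : m ≤ a.length := by omega
      have hdr : (a.drop (a.length - m)).length = m := by simp; omega
      cases hu : a.drop (a.length - m) with
      | nil => rw [hu] at hdr; simp at hdr; omega
      | cons hd tl =>
        have htu : a = a.take (a.length - m) ++ hd :: tl := by
          rw [← hu, List.take_append_drop]
        set t := a.take (a.length - m) with ht
        have htlen : t.length = a.length - m := by simp [ht]
        have hulen : (hd :: tl).length = m := by rw [← hu]; exact hdr
        have hlen2 : (((t ++ hd :: tl).length : Int)) = (t.length : Int) + (m : Int) := by
          simp [List.length_append, hulen]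
        rw [htu, PySem.List.enumerate_append, List.filter_append]
        -- the prefix part: rewrite the condition to t's own length
        have hcongr : (PySem.List.enumerate t 0).filter
              (fun p => PySem.Int.mod (((t ++ hd :: tl).length : Int) - p.1) (m : Int) == 0)
            = (PySem.List.enumerate t 0).filter
              (fun p => PySem.Int.mod ((t.length : Int) - p.1) (m : Int) == 0) := by
          apply List.filter_congr
          intro p hp
          rcases (PySem.List.mem_enumerate_iff _ _ _).mp hp with ⟨j, hj, rfl⟩
          have hiff : ((m : Int) ∣ (((t ++ hd :: tl).length : Int) - (0 + (j : Int))))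
              ↔ ((m : Int) ∣ ((t.length : Int) - (0 + (j : Int)))) := by
            rw [hlen2]
            constructor
            · intro h
              have h' := dvd_sub h (dvd_refl (m : Int))
              have e : ((t.length : Int) + (m : Int) - (0 + (j : Int)) - (m : Int))
                  = (t.length : Int) - (0 + (j : Int)) := by ring
              rwa [e] at h'
            · intro h
              have h' := dvd_add h (dvd_refl (m : Int))
              have e : ((t.length : Int) - (0 + (j : Int)) + (m : Int))
                  = (t.length : Int) + (m : Int) - (0 + (j : Int)) := by ring
              rwa [e] at h'
          rw [Bool.eq_iff_iff]
          simp only [beq_iff_eq, PySem.Int.mod_eq_zero_iff_dvd]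
          exact hiff
        rw [hcongr]
        -- the suffix part: only its first element passes the test
        rw [PySem.List.enumerate_cons, List.filter_cons]
        rw [if_pos (show (PySem.Int.mod (((t ++ hd :: tl).length : Int) - (0 + (t.length : Int))) (m : Int) == 0) = true by
          rw [hlen2]
          simp only [beq_iff_eq]
          rw [PySem.Int.mod_eq_zero_iff_dvd]
          exact ⟨1, by ring⟩)]
        have htail : (PySem.List.enumerate tl (0 + (t.length : Int) + 1)).filter
            (fun p => PySem.Int.mod (((t ++ hd :: tl).length : Int) - p.1) (m : Int) == 0) = [] := by
          apply List.filter_eq_nil_iff.mpr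
          intro p hp
          rcases (PySem.List.mem_enumerate_iff _ _ _).mp hp with ⟨j, hj, rfl⟩
          simp only [beq_iff_eq, PySem.Int.mod_eq_zero_iff_dvd]
          rw [hlen2]
          have hjm : j < m - 1 := by
            have h5 : tl.length + 1 = m := by simpa using hulen
            omega
          exact not_dvd_of_bounds (by exact_mod_cast hm) (by omega) (by omega)
        rw [htail, List.map_append, List.sum_append]
        -- recursion on the prefix
        rw [ih t (by omega)]
        -- lsum of the reverse of t ++ hd :: tl
        have hrev : (t ++ hd :: tl).reverse = (hd :: tl).reverse ++ t.reverse := by simp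
        rw [hrev]
        have hurlen : (hd :: tl).reverse.length = m := by simpa using hulen
        rw [lsum_of_le (s := (hd :: tl).reverse ++ t.reverse) hm (by rw [List.length_append, hurlen]; omega)]
        have hdrop : ((hd :: tl).reverse ++ t.reverse).drop m = t.reverse := by
          rw [← hurlen]; exact List.drop_left
        rw [hdrop]
        have hget : PySem.List.pyGetD ((hd :: tl).reverse ++ t.reverse) ((m : Int) - 1) 0 = hd := by
          have hcast : ((m : Int) - 1) = ((m - 1 : Nat) : Int) := by omega
          rw [hcast, PySem.List.pyGetD_natCast]
          have hlt1 : m - 1 < ((hd :: tl).reverse ++ t.reverse).length := by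
            rw [List.length_append, hurlen]; omega
          rw [List.getD_eq_getElem _ 0 hlt1]
          have hlt2 : m - 1 < (hd :: tl).reverse.length := by rw [hurlen]; omega
          rw [List.getElem_append_left hlt2, List.getElem_reverse]
          have h0 : tl.length - (m - 1) = 0 := by
            have h5 : tl.length + 1 = m := by simpa using hulen
            omega
          simp [h0]
        rw [hget]
        simp
        ring

-- descending sort is the reverse of ascending sort (for the identity key)
theorem sorted_true_eq_reverse (xs : List Int) :
    PySem.List.sorted xs (fun x => x) true = (PySem.List.sorted xs (fun x => x) false).reverse := by
  have h1 : (PySem.List.sorted xs (fun x => x) true).reverse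
      = PySem.List.sorted xs (fun x => x) false := by
    apply PySem.List.eq_of_perm_of_pairwise_le_of_injective (fun x => x) (fun _ _ h => h)
    · exact (List.reverse_perm _).trans ((PySem.List.sorted_perm xs (fun x => x) true).trans
        ((PySem.List.sorted_perm xs (fun x => x) false).symm))
    · rw [List.pairwise_reverse]
      simpa using PySem.List.sorted_pairwise_rev xs (fun x => x)
    · exact PySem.List.sorted_pairwise xs (fun x => x)
  rw [← h1, List.reverse_reverse]

-- ===== VERDICT (by name: the statement is the Claim_ definition above) =====
theorem solution_spec : Claim_equal_solution := by
  intro k m score _ hpre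
  unfold Spec_solution solution solution_alt
  simp only []
  obtain ⟨mn, rfl⟩ : ∃ mn : Nat, m = (mn : Int) := ⟨m.toNat, by unfold Pre_solution at hpre; omega⟩
  have hmn : 0 < mn := by unfold Pre_solution at hpre; exact_mod_cast hpre
  set a := PySem.List.sorted score (fun x => x) false with ha
  set d := PySem.List.sorted score (fun x => x) true with hd
  have hda : d = a.reverse := sorted_true_eq_reverse score
  have halen : a.length = score.length := PySem.List.length_sorted score _ false
  have hdlen : d.length = score.length := PySem.List.length_sorted score _ true
  have hB : (mn : Int) * (((PySem.List.enumerate a 0).filter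
        (fun p => PySem.Int.mod ((a.length : Int) - p.1) (mn : Int) == 0)).map (fun p => p.2)).sum
      = (mn : Int) * lsum mn d := by
    rw [bfilter_sum mn hmn a.length a (le_refl _), ← hda]
  rw [hB]
  by_cases hA : (score.length : Int) < (mn : Int)
  · rw [if_pos hA]
    have : d.length < mn := by rw [hdlen]; exact_mod_cast hA
    rw [lsum_of_lt this]; ring
  · rw [if_neg hA]
    have hpd : d.Pairwise (fun x y => y ≤ x) := by
      rw [hda, List.pairwise_reverse]
      simpa using PySem.List.sorted_pairwise score (fun x => x)
    have hcl := solutionLoop_eq_lsum d mn hmn hpd _ 0 0 rfl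
    have hr := pyRange_pos_nat 0 d.length mn hmn
    simp only [Nat.cast_zero] at hr hcl
    rw [hr]
    simpa using hcl
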